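-- pv_equiv track=rewrite | github.com/Rrrinav/c_automaton | rle.py | parse_rle
-- ===== SOURCE A (Python) =====
-- def parse_rle(rle_string):
--     lines = rle_string.strip().split('\n')
--     pattern = []
--     width, height = 0, 0
--     row = []
--
--     for line in lines:
--         if line.startswith('#'):
--             # Skip metadata lines
--             continue
--         elif line.startswith('x'):
--             # Parse header line for width and height
--             header_parts = line.split(',')
--             width = int(header_parts[0].split('=')[1].strip())
--             height = int(header_parts[1].split('=')[1].strip())
--         else:
--             count = 0
--             for char in line:
--                 if char.isdigit():
--                     # Accumulate digits to form a repeat count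
--                     count = count * 10 + int(char)
--                 elif char == 'b':
--                     # Dead cells
--                     row.extend([0] * (count if count > 0 else 1))
--                     count = 0
--                 elif char == 'o':
--                     # Live cells
--                     row.extend([1] * (count if count > 0 else 1))
--                     count = 0
--                 elif char == '$':
--                     # End of line, add row to pattern
--                     pattern.append(row)
--                     row = []
--                 elif char == '!':
--                     # End of pattern
--                     break
--
--             # If there's an incomplete row, append it to the pattern
--             if row:
--                 pattern.append(row)
--                 row = []
--
--     # Ensure the pattern has the correct dimensions
--     while len(pattern) < height:
--         pattern.append([0] * width)
--     for i in range(len(pattern)):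
--         if len(pattern[i]) < width:
--             pattern[i].extend([0] * (width - len(pattern[i])))
--
--     return pattern
-- ===== SOURCE B (Python) =====
-- import re
--
-- # Token-based reimplementation: each pattern line is lexed into digit-run /
-- # b / o / $ / ! tokens once, and the loop runs over tokens instead of single
-- # characters; padding is done by list building instead of in-place mutation.
-- def parse_rle(rle_string):
--     pattern = []
--     width = height = 0
--     for line in rle_string.strip().split('\n'):
--         if line.startswith('#'):
--             continue
--         if line.startswith('x'):
--             header_parts = line.split(',')
--             width = int(header_parts[0].split('=')[1].strip())
--             height = int(header_parts[1].split('=')[1].strip())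
--             continue
--         row, count = [], 0
--         for tok in re.findall(r'\d+|[bo$!]', line):
--             if tok == '!':
--                 break
--             elif tok == '$':
--                 pattern.append(row)
--                 row = []
--             elif tok == 'b' or tok == 'o':
--                 row += [int(tok == 'o')] * max(count, 1)
--                 count = 0
--             else:
--                 count = count * 10 ** len(tok) + int(tok)
--         if row:
--             pattern.append(row)
--     pattern += [[0] * width] * (height - len(pattern))
--     return [r + [0] * (width - len(r)) for r in pattern]
-- ===== Notes on version B (the rewrite author's own statement) =====
-- stated objective: alternative
-- what changed: B lexes each pattern line once into digit-run/b/o/$/! tokens (re.findall) and loops over tokens (accumulating a digit run in one step as count*10**len(tok)+int(tok)), and replaces the in-place while/for padding loops with list concatenation and a comprehension over the rows.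
import Mathlib
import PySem

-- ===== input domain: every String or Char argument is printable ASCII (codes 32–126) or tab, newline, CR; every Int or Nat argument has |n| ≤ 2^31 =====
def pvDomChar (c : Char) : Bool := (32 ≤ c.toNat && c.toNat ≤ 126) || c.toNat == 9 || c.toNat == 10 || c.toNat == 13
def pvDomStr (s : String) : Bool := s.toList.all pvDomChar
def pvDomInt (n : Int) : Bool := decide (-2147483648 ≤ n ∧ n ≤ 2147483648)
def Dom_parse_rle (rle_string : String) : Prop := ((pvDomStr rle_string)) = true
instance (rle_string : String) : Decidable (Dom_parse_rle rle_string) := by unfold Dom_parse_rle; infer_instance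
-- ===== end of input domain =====

-- B re-implements the RLE parse by lexing each pattern line into digit-run/b/o/$/! tokens
-- and looping over tokens, with padding done by list building instead of in-place mutation
-- (objective: alternative decomposition, same exact return value).

-- ===== PORT A =====

-- int(char) for a char guarded by isdigit: exact, since on the ASCII domain isdigit
-- holds only for '0'..'9', where Python's int(char) is the digit value.
def pvDigitVal (c : Char) : Int := (c.toNat : Int) - 48

-- int(line.split(',')[i].split('=')[1].strip()); the pyGet?/ofChars? failures (IndexError /
-- ValueError in Python) are excluded by Pre_, so the .getD defaults are never reached there.
def pvHeaderVal (line : List Char) (i : Int) : Int :=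
  (PySem.Int.ofChars? (PySem.Chars.strip
    ((PySem.List.pyGet? (PySem.Chars.splitOn
      ((PySem.List.pyGet? (PySem.Chars.splitOn line [',']) i).getD []) ['=']) 1).getD []))).getD 0

-- the inner 'for char in line' loop of A, with the '!' break; state (count, row, pattern)
def pvALoop : List Char → Int → List Int → List (List Int) → Int × List Int × List (List Int)
  | [], count, row, pattern => (count, row, pattern)
  | c :: cs, count, row, pattern =>
    if PySem.Chars.isdigit c then
      pvALoop cs (count * 10 + pvDigitVal c) row pattern
    else if c = 'b' then
      pvALoop cs 0 (row ++ PySem.List.pyRepeat [0] (if count > 0 then count else 1)) pattern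
    else if c = 'o' then
      pvALoop cs 0 (row ++ PySem.List.pyRepeat [1] (if count > 0 then count else 1)) pattern
    else if c = '$' then
      pvALoop cs count [] (pattern ++ [row])
    else if c = '!' then
      (count, row, pattern)
    else
      pvALoop cs count row pattern

-- the outer 'for line in lines' loop of A; state (pattern, width, height, row)
def pvALines : List (List Char) → List (List Int) → Int → Int → List Int →
    List (List Int) × Int × Int × List Int
  | [], pattern, w, h, row => (pattern, w, h, row)
  | l :: ls, pattern, w, h, row =>
    if PySem.Chars.startswith l ['#'] then
      pvALines ls pattern w h row
    else if PySem.Chars.startswith l ['x'] then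
      pvALines ls pattern (pvHeaderVal l 0) (pvHeaderVal l 1) row
    else
      let st := pvALoop l 0 row pattern
      if st.2.1 = [] then pvALines ls st.2.2 w h st.2.1
      else pvALines ls (st.2.2 ++ [st.2.1]) w h []

-- 'while len(pattern) < height: pattern.append([0] * width)'
def pvAPadHeight (pattern : List (List Int)) (w h : Int) : List (List Int) :=
  if (pattern.length : Int) < h then
    pvAPadHeight (pattern ++ [PySem.List.pyRepeat [0] w]) w h
  else pattern
termination_by (h - pattern.length).toNat
decreasing_by simp [List.length_append]; omega

-- 'for i in range(len(pattern)): if len(pattern[i]) < width: pattern[i].extend([0]*(width-len(pattern[i])))'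
def pvAPadWidth (pattern : List (List Int)) (w : Int) : List (List Int) :=
  (PySem.List.pyRange 0 (pattern.length : Int) 1).foldl
    (fun p i =>
      let r := (PySem.List.pyGet? p i).getD []
      if (r.length : Int) < w then p.set i.toNat (r ++ PySem.List.pyRepeat [0] (w - (r.length : Int)))
      else p)
    pattern

def parse_rle (rle_string : String) : List (List Int) :=
  let lines := PySem.Chars.splitOn (PySem.Chars.strip rle_string.toList) ['\n']
  let st := pvALines lines [] 0 0 []
  pvAPadWidth (pvAPadHeight st.1 st.2.1 st.2.2.1) st.2.1

-- ===== PORT B =====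

inductive PvTok
  | num (run : List Char)
  | b
  | o
  | dollar
  | bang
deriving DecidableEq, Repr

-- re.findall(r'\d+|[bo$!]', line): maximal digit runs and the single chars b o $ !,
-- in order, everything else skipped — exact by construction of the regex.
def pvLex : List Char → List PvTok
  | [] => []
  | c :: cs =>
    if PySem.Chars.isdigit c then
      PvTok.num (List.takeWhile PySem.Chars.isdigit (c :: cs)) ::
        pvLex (List.dropWhile PySem.Chars.isdigit (c :: cs))
    else if c = 'b' then PvTok.b :: pvLex cs
    else if c = 'o' then PvTok.o :: pvLex cs
    else if c = '$' then PvTok.dollar :: pvLex cs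
    else if c = '!' then PvTok.bang :: pvLex cs
    else pvLex cs
termination_by l => l.length
decreasing_by
  · simp only [List.dropWhile_cons, *, if_pos]
    have := List.length_dropWhile_le PySem.Chars.isdigit cs
    simp only [List.length_cons]; omega
  all_goals simp

-- int(tok) for a token matched by \d+: exact, since such a token is a nonempty run of
-- ASCII digits, on which Python's int() is the plain decimal value.
def pvRunVal (run : List Char) : Int :=
  run.foldl (fun a c => a * 10 + ((c.toNat : Int) - 48)) 0

-- B's 'for tok in tokens' loop; returns (row, pattern)
def pvBLoop : List PvTok → Int → List Int → List (List Int) → List Int × List (List Int)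
  | [], _, row, pattern => (row, pattern)
  | t :: ts, count, row, pattern =>
    match t with
    | .bang => (row, pattern)
    | .dollar => pvBLoop ts count [] (pattern ++ [row])
    | .b => pvBLoop ts 0 (row ++ PySem.List.pyRepeat [0] (max count 1)) pattern
    | .o => pvBLoop ts 0 (row ++ PySem.List.pyRepeat [1] (max count 1)) pattern
    | .num run => pvBLoop ts (count * 10 ^ run.length + pvRunVal run) row pattern

-- B's outer loop; row and count are local to each line, so the state is (pattern, width, height)
def pvBLines : List (List Char) → List (List Int) → Int → Int →
    List (List Int) × Int × Int
  | [], pattern, w, h => (pattern, w, h)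
  | l :: ls, pattern, w, h =>
    if PySem.Chars.startswith l ['#'] then
      pvBLines ls pattern w h
    else if PySem.Chars.startswith l ['x'] then
      pvBLines ls pattern (pvHeaderVal l 0) (pvHeaderVal l 1)
    else
      let st := pvBLoop (pvLex l) 0 [] pattern
      if st.1 = [] then pvBLines ls st.2 w h
      else pvBLines ls (st.2 ++ [st.1]) w h

def parse_rle_alt (rle_string : String) : List (List Int) :=
  let lines := PySem.Chars.splitOn (PySem.Chars.strip rle_string.toList) ['\n']
  let st := pvBLines lines [] 0 0
  let pattern := st.1 ++
    PySem.List.pyRepeat [PySem.List.pyRepeat [0] st.2.1] (st.2.2 - (st.1.length : Int))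
  pattern.map (fun r => r ++ PySem.List.pyRepeat [0] (st.2.1 - (r.length : Int)))

-- ===== PRECONDITION & SPEC =====

-- one comma-separated header part 'x = NN': has an '=' and an int after it
def pvPartOk (p : List Char) : Bool :=
  2 ≤ (PySem.Chars.splitOn p ['=']).length &&
  (PySem.Int.ofChars? (PySem.Chars.strip ((PySem.Chars.splitOn p ['=']).getD 1 []))).isSome

-- Pre_ excludes exactly the inputs on which A raises: a non-comment line starting with the
-- letter x whose header does not have two comma parts each with an equals sign followed by
-- something int() accepts (IndexError / ValueError in A); on every other input A returns normally.
def Pre_parse_rle (rle_string : String) : Prop :=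
  ∀ l ∈ PySem.Chars.splitOn (PySem.Chars.strip rle_string.toList) ['\n'],
    PySem.Chars.startswith l ['#'] = false → PySem.Chars.startswith l ['x'] = true →
      2 ≤ (PySem.Chars.splitOn l [',']).length ∧
      pvPartOk ((PySem.Chars.splitOn l [',']).getD 0 []) = true ∧
      pvPartOk ((PySem.Chars.splitOn l [',']).getD 1 []) = true

instance (rle_string : String) : Decidable (Pre_parse_rle rle_string) := by
  unfold Pre_parse_rle; infer_instance

def pvWitness_parse_rle : String := "x = 3, y = 2\n2o$bo!"

def Spec_parse_rle (rle_string : String) (out : List (List Int)) : Prop := out = parse_rle_alt rle_string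
instance (rle_string : String) (out : List (List Int)) : Decidable (Spec_parse_rle rle_string out) := by unfold Spec_parse_rle; infer_instance

-- ===== CLAIM (what is proved, stated in full; the proofs are below) =====
def Claim_equal_parse_rle : Prop := ∀ (rle_string : String), Dom_parse_rle rle_string → Pre_parse_rle rle_string → Spec_parse_rle rle_string (parse_rle rle_string)

-- ===== LEMMAS AND PROOFS =====

-- value shift of the decimal fold: folding digits onto a = a * 10^len + fold from 0
theorem pv_runVal_shift (ds : List Char) (a : Int) :
    ds.foldl (fun x c => x * 10 + ((c.toNat : Int) - 48)) a
      = a * 10 ^ ds.length + pvRunVal ds := by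
  induction ds generalizing a with
  | nil => simp [pvRunVal]
  | cons c ds ih =>
    simp only [List.foldl_cons, List.length_cons, pvRunVal]
    rw [ih, ih ((0:Int) * 10 + (↑c.toNat - 48))]
    ring

-- A consumes a run of digits by accumulating them into count
theorem pv_aloop_digits (ds : List Char) (h : ∀ c ∈ ds, PySem.Chars.isdigit c = true) :
    ∀ (cs : List Char) (count : Int) (row : List Int) (pat : List (List Int)),
      pvALoop (ds ++ cs) count row pat
        = pvALoop cs (ds.foldl (fun a c => a * 10 + pvDigitVal c) count) row pat := by
  induction ds with
  | nil => intro cs count row pat; simp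
  | cons c ds ih =>
    intro cs count row pat
    have hc : PySem.Chars.isdigit c = true := h c (List.mem_cons_self ..)
    simp only [List.cons_append, pvALoop, hc, if_pos, List.foldl_cons]
    exact ih (fun x hx => h x (List.mem_cons_of_mem _ hx)) cs _ row pat

theorem pv_max_eq (c : Int) : max c 1 = if c > 0 then c else 1 := by
  split <;> omega

-- the token loop over the lexed line computes A's char loop (row and pattern parts)
theorem pv_loop_eq (cs : List Char) :
    ∀ (count : Int) (row : List Int) (pat : List (List Int)),
      pvBLoop (pvLex cs) count row pat
        = ((pvALoop cs count row pat).2.1, (pvALoop cs count row pat).2.2) := by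
  fun_induction pvLex cs with
  | case1 => intro count row pat; simp [pvBLoop, pvALoop]
  | case2 c cs hdig ih =>
    intro count row pat
    simp only [pvBLoop]
    rw [ih]
    have hrun : ∀ x ∈ List.takeWhile PySem.Chars.isdigit (c :: cs),
        PySem.Chars.isdigit x = true := fun x hx => List.mem_takeWhile_imp hx
    conv_rhs => rw [← List.takeWhile_append_dropWhile (p := PySem.Chars.isdigit) (l := c :: cs)]
    rw [pv_aloop_digits _ hrun]
    have hcnt : (List.takeWhile PySem.Chars.isdigit (c :: cs)).foldl
        (fun a c => a * 10 + pvDigitVal c) count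
        = count * 10 ^ (List.takeWhile PySem.Chars.isdigit (c :: cs)).length
            + pvRunVal (List.takeWhile PySem.Chars.isdigit (c :: cs)) := by
      simp only [pvDigitVal]
      exact pv_runVal_shift _ _
    rw [hcnt]
  | case3 cs hdig ih =>
    intro count row pat
    simp [pvBLoop, pvALoop, pv_max_eq, ih,
      show PySem.Chars.isdigit 'b' = false by decide]
  | case4 cs hdig hb ih =>
    intro count row pat
    simp [pvBLoop, pvALoop, pv_max_eq, ih,
      show PySem.Chars.isdigit 'o' = false by decide]
  | case5 cs hdig hb ho ih =>
    intro count row pat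
    simp [pvBLoop, pvALoop, ih,
      show PySem.Chars.isdigit '$' = false by decide]
  | case6 cs hdig hb ho hd ih =>
    intro count row pat
    simp [pvBLoop, pvALoop,
      show PySem.Chars.isdigit '!' = false by decide]
  | case7 c cs hdig hb ho hd hbang ih =>
    intro count row pat
    simp only [hdig, hb, ho, hd, hbang, if_false, pvALoop]
    rw [ih]
    simp

-- outer loops agree; A's row accumulator is [] again at the start of every line
theorem pv_lines_eq (ls : List (List Char)) :
    ∀ (pat : List (List Int)) (w h : Int),
      pvALines ls pat w h []
        = ((pvBLines ls pat w h).1, (pvBLines ls pat w h).2.1,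
           (pvBLines ls pat w h).2.2, ([] : List Int)) := by
  induction ls with
  | nil => intro pat w h; simp [pvALines, pvBLines]
  | cons l ls ih =>
    intro pat w h
    simp only [pvALines, pvBLines, pv_loop_eq]
    split
    · exact ih pat w h
    · split
      · exact ih pat _ _
      · split
        next hrow => rw [hrow]; exact ih _ w h
        next hrow => exact ih _ w h

-- the height-padding while loop appends exactly (h - len)⁺ blank rows
theorem pv_padHeight_eq (pat : List (List Int)) (w h : Int) :
    pvAPadHeight pat w h
      = pat ++ List.replicate (h - (pat.length : Int)).toNat (PySem.List.pyRepeat [0] w) := by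
  fun_induction pvAPadHeight pat w h with
  | case1 pat hlt ih =>
    rw [ih]
    rw [List.length_append, List.append_assoc, List.singleton_append]
    have hn : (h - (pat.length : Int)).toNat
        = (h - ((pat.length + 1 : Nat) : Int)).toNat + 1 := by push_cast; omega
    rw [hn, List.replicate_succ]
    push_cast
    simp
  | case2 pat hge =>
    have hn : (h - (pat.length : Int)).toNat = 0 := by omega
    simp [hn]

-- a fold that rewrites index i+1 over a cons leaves the head alone
theorem pv_fold_shift (w : Int) (l : List Nat) (x : List Int) (p : List (List Int)) :
    l.foldl (fun acc i =>
        let r := acc[i + 1]?.getD ([] : List Int)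
        if (r.length : Int) < w then
          acc.set (i + 1) (r ++ PySem.List.pyRepeat [0] (w - (r.length : Int)))
        else acc) (x :: p)
      = x :: l.foldl (fun acc i =>
          let r := acc[i]?.getD ([] : List Int)
          if (r.length : Int) < w then
            acc.set i (r ++ PySem.List.pyRepeat [0] (w - (r.length : Int)))
          else acc) p := by
  induction l generalizing x p with
  | nil => rfl
  | cons i l ih =>
    simp only [List.foldl_cons, List.getElem?_cons_succ, List.set_cons_succ]
    split <;> exact ih _ _

-- the index loop with in-place set is a map over the rows
theorem pv_set_fold (w : Int) (p : List (List Int)) :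
    (List.range p.length).foldl (fun acc i =>
        let r := acc[i]?.getD ([] : List Int)
        if (r.length : Int) < w then
          acc.set i (r ++ PySem.List.pyRepeat [0] (w - (r.length : Int)))
        else acc) p
      = p.map (fun r =>
          if (r.length : Int) < w then r ++ PySem.List.pyRepeat [0] (w - (r.length : Int))
          else r) := by
  induction p with
  | nil => rfl
  | cons a p ih =>
    rw [List.length_cons, List.range_succ_eq_map, List.foldl_cons, List.foldl_map]
    simp only [List.getElem?_cons_zero, Option.getD_some, List.set_cons_zero,
      Nat.succ_eq_add_one]
    have h0 : (if (a.length : Int) < w then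
          (a ++ PySem.List.pyRepeat [0] (w - (a.length : Int))) :: p else a :: p)
        = (if (a.length : Int) < w then
            a ++ PySem.List.pyRepeat [0] (w - (a.length : Int)) else a) :: p := by
      split <;> rfl
    rw [h0, pv_fold_shift, ih, List.map_cons]

-- pvAPadWidth is that map
theorem pv_padWidth_eq (p : List (List Int)) (w : Int) :
    pvAPadWidth p w
      = p.map (fun r =>
          if (r.length : Int) < w then r ++ PySem.List.pyRepeat [0] (w - (r.length : Int))
          else r) := by
  rw [pvAPadWidth, PySem.List.pyRange_zero_natCast, List.foldl_map, ← pv_set_fold w p]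
  apply PySem.List.foldl_congr_mem
  intro acc i _
  simp [PySem.List.pyGet?_natCast]

-- the conditional pad equals the unconditional pad: for w ≤ len the pad list is empty
theorem pv_pad_pointwise (w : Int) (r : List Int) :
    (if (r.length : Int) < w then r ++ PySem.List.pyRepeat [0] (w - (r.length : Int)) else r)
      = r ++ PySem.List.pyRepeat [0] (w - (r.length : Int)) := by
  split
  next => rfl
  next h =>
    rw [PySem.List.pyRepeat_singleton]
    have : (w - (r.length : Int)).toNat = 0 := by omega
    simp [this]

-- ===== VERDICT (by name: the statement is the Claim_ definition above) =====
theorem parse_rle_spec : Claim_equal_parse_rle := by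
  intro s _ _
  show parse_rle s = parse_rle_alt s
  unfold parse_rle parse_rle_alt
  simp only [pv_lines_eq, pv_padHeight_eq, pv_padWidth_eq]
  simp only [pv_pad_pointwise]
  simp only [PySem.List.pyRepeat_singleton]
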